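-- pv_equiv track=rewrite | github.com/wenting-zhao/verification_scaling | verification_scaling/utils.py | get_test_cases_with_unique_outputs
-- ===== SOURCE A (Python) =====
-- def get_output_to_test_cases_map(test_cases):
--     """
--     Group test cases by their expected outputs.
--
--     Args:
--         test_cases: List of test case assertions
--
--     Returns:
--         Dictionary mapping outputs to lists of test cases
--     """
--     output_to_test_cases = {}
--
--     for test_case in test_cases:
--         # Find the expected output (after == or =)
--         if "==" in test_case:
--             output = test_case.split("==")[1].strip()
--         else:
--             continue
--
--         # Remove surrounding quotes if present
--         output = output.strip('"\'')
--
--         # Add test case to the list for this output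
--         if output not in output_to_test_cases:
--             output_to_test_cases[output] = []
--         output_to_test_cases[output].append(test_case)
--
--     return output_to_test_cases
--
-- def get_test_cases_with_unique_outputs(test_cases, n):
--     if len(test_cases) == 0:
--         return []
--
--     # Group test cases by their outputs
--     output_to_test_cases = get_output_to_test_cases_map(test_cases)
--
--     # Get unique outputs
--     unique_outputs = list(output_to_test_cases.keys())
--
--     # Initialize result list
--     result = []
--
--     # Fill result list with n test cases
--     for i in range(n):
--         if len(unique_outputs) == 0:
--             break
--         # Get the output to use (cycling through the unique outputs)
--         output_index = i % len(unique_outputs)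
--         output = unique_outputs[output_index]
--
--         # Get a test case for this output
--         test_cases_for_output = output_to_test_cases[output]
--         case_index = (i // len(unique_outputs)) % len(test_cases_for_output)
--         result.append(test_cases_for_output[case_index])
--
--     return result
-- ===== SOURCE B (Python) =====
-- def get_test_cases_with_unique_outputs(test_cases, n):
--     # Same grouping step: map each expected output (text after the first '==',
--     # stripped of whitespace and quotes) to its list of cases, skipping lines
--     # without '=='.
--     groups = {}
--     for tc in test_cases:
--         if "==" not in tc:
--             continue
--         out = tc.split("==")[1].strip().strip('"\'')
--         groups.setdefault(out, []).append(tc)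
--     if not groups or n <= 0:
--         return []
--     m = len(groups)
--     # Column-major fill: preallocate the n result slots, then for each group j
--     # write its cases, repeated cyclically, into the stride j, j+m, j+2m, ...
--     result = [""] * n
--     for j, cases in enumerate(groups.values()):
--         k = len(cases)
--         for t, p in enumerate(range(j, n, m)):
--             result[p] = cases[t % k]
--     return result
-- ===== Notes on version B (the rewrite author's own statement) =====
-- stated objective: alternative
-- what changed: A fills the result row-major with one loop over i in range(n), reconstructing which group and which case from the single counter via i % m and i // m; B preallocates the n result slots and scatters column-major: each output group independently writes its cases, repeated cyclically, into its own stride of positions j, j+m, j+2m, ... (grouping uses dict.setdefault instead of an explicit membership check).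
import Mathlib
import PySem

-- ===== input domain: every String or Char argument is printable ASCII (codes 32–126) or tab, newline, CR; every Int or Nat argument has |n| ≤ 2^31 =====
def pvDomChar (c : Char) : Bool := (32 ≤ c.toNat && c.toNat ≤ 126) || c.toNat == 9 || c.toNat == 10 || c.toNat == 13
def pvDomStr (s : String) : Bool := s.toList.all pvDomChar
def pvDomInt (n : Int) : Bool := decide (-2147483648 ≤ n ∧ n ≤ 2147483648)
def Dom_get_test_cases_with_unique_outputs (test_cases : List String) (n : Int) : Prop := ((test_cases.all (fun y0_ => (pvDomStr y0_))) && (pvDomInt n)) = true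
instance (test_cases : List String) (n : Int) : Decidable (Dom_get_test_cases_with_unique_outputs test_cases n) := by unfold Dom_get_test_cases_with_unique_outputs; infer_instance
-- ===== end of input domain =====

-- B replaces A's row-major fill loop (one counter i, positions reconstructed via i // m and
-- i % m) by a column-major scatter: preallocate the n result slots and let each output group
-- write its cases cyclically into its own stride j, j+m, j+2m, … (objective: alternative).

-- common output-extraction expression of both Pythons: test_case.split("==")[1].strip().strip('"\'')
def pvOutput (tc : String) : String :=
  PySem.Str.stripChars
    (PySem.Str.strip (PySem.List.pyGetD ((PySem.Str.split? tc "==").getD []) 1 ""))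
    "\"'"

-- ===== PORT A =====
-- helper get_output_to_test_cases_map: 'if output not in d: d[output] = []' then append
def pvGetOutputToTestCasesMap (test_cases : List String) : PySem.Dict String (List String) :=
  test_cases.foldl (fun d tc =>
    if PySem.Str.isIn "==" tc then
      let output := pvOutput tc
      let d' := if d.contains output then d else d.insert output ([] : List String)
      d'.insert output (d'.getD output [] ++ [tc])
    else d) PySem.Dict.empty

-- the 'for i in range(n)' fill loop; 'break' when unique_outputs is empty returns result
def pvFillA (d : PySem.Dict String (List String)) (outs : List String) :
    List Int → List String → List String
  | [], result => result
  | i :: rest, result =>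
    if PySem.List.len outs = 0 then result
    else
      let output := PySem.List.pyGetD outs (PySem.Int.mod i (PySem.List.len outs)) ""
      let tcsO := d.getD output []
      pvFillA d outs rest (result ++
        [PySem.List.pyGetD tcsO
          (PySem.Int.mod (PySem.Int.floordiv i (PySem.List.len outs)) (PySem.List.len tcsO)) ""])

def get_test_cases_with_unique_outputs (test_cases : List String) (n : Int) : List String :=
  if PySem.List.len test_cases = 0 then []
  else
    let d := pvGetOutputToTestCasesMap test_cases
    pvFillA d d.keys (PySem.List.pyRange 0 n 1) []

-- ===== PORT B =====
-- grouping via groups.setdefault(output, []).append(test_case)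
def pvGroupsB (test_cases : List String) : PySem.Dict String (List String) :=
  test_cases.foldl (fun d tc =>
    if PySem.Str.isIn "==" tc then d.modify (pvOutput tc) [] (· ++ [tc]) else d)
    PySem.Dict.empty

-- inner loop: for t, p in enumerate(range(j, n, m)): result[p] = cases[t % k]
def pvInner (res : List String) (j nI mI : Int) (cases : List String) : List String :=
  (PySem.List.enumerate (PySem.List.pyRange j nI mI)).foldl
    (fun r tp => PySem.List.pySetD r tp.2
      (PySem.List.pyGetD cases (PySem.Int.mod tp.1 (PySem.List.len cases)) "")) res

def get_test_cases_with_unique_outputs_alt (test_cases : List String) (n : Int) : List String :=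
  let groups := pvGroupsB test_cases
  if groups.size = 0 ∨ n ≤ 0 then []
  else
    let m : Int := groups.size
    -- result = [""] * n, then each group fills its stride
    (PySem.List.enumerate groups.values).foldl
      (fun res jc => pvInner res jc.1 n m jc.2)
      (List.replicate n.toNat "")

-- ===== PRECONDITION & SPEC =====
def Spec_get_test_cases_with_unique_outputs (test_cases : List String) (n : Int) (out : List String) : Prop := out = get_test_cases_with_unique_outputs_alt test_cases n
instance (test_cases : List String) (n : Int) (out : List String) : Decidable (Spec_get_test_cases_with_unique_outputs test_cases n out) := by unfold Spec_get_test_cases_with_unique_outputs; infer_instance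

-- ===== CLAIM (what is proved, stated in full; the proofs are below) =====
def Claim_equal_get_test_cases_with_unique_outputs : Prop := ∀ (test_cases : List String) (n : Int), Dom_get_test_cases_with_unique_outputs test_cases n → Spec_get_test_cases_with_unique_outputs test_cases n (get_test_cases_with_unique_outputs test_cases n)

-- ===== LEMMAS AND PROOFS =====

-- the two grouping passes build the same dict
theorem pvGroups_eq (tcs : List String) : pvGetOutputToTestCasesMap tcs = pvGroupsB tcs := by
  unfold pvGetOutputToTestCasesMap pvGroupsB
  apply PySem.List.foldl_congr_mem
  intro d tc _
  by_cases h : PySem.Str.isIn "==" tc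
  · simp only [h, if_true, PySem.Dict.modify]
    by_cases hc : d.contains (pvOutput tc)
    · simp [hc]
    · have hc' : d.contains (pvOutput tc) = false := by simpa using hc
      simp [hc', PySem.Dict.getD_insert_self, PySem.Dict.insert_insert_self,
        PySem.Dict.getD_of_not_contains d [] hc']
  · rw [if_neg h, if_neg h]

theorem pvNodupKeysGroupsB (tcs : List String) : (pvGroupsB tcs).keys.Nodup := by
  unfold pvGroupsB
  generalize hd : PySem.Dict.empty = d0
  have h0 : d0.keys.Nodup := by rw [← hd]; exact PySem.Dict.nodup_keys_empty
  clear hd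
  induction tcs generalizing d0 with
  | nil => exact h0
  | cons tc rest ih =>
    simp only [List.foldl_cons]
    apply ih
    by_cases h : PySem.Str.isIn "==" tc
    · rw [if_pos h, PySem.Dict.keys_modify]
      exact PySem.Dict.nodup_keys_insert _ _ _ h0
    · rwa [if_neg h]

-- the value A's fill loop appends at iteration i
def pvIdx (d : PySem.Dict String (List String)) (outs : List String) (i : Int) : String :=
  let output := PySem.List.pyGetD outs (PySem.Int.mod i (PySem.List.len outs)) ""
  let tcsO := d.getD output []
  PySem.List.pyGetD tcsO
    (PySem.Int.mod (PySem.Int.floordiv i (PySem.List.len outs)) (PySem.List.len tcsO)) ""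

theorem pvFillA_nil (d : PySem.Dict String (List String)) (l : List Int) (res : List String) :
    pvFillA d [] l res = res := by
  cases l <;> simp [pvFillA]

theorem pvFillA_eq (d : PySem.Dict String (List String)) (outs : List String)
    (h : outs ≠ []) (l : List Int) (res : List String) :
    pvFillA d outs l res = res ++ l.map (pvIdx d outs) := by
  induction l generalizing res with
  | nil => simp [pvFillA]
  | cons i rest ih =>
    have hlen : ¬ (PySem.List.len outs = 0) := by
      simp [PySem.List.len_eq, h]
    simp only [pvFillA, hlen, if_false, List.map_cons, ih]
    simp [pvIdx]


-- enumerate over a mapped range, with start 0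
theorem pvEnumMapRange {α : Type} (g : Nat → α) (C : Nat) :
    PySem.List.enumerate ((List.range C).map g) 0 =
      (List.range C).map (fun (t : Nat) => ((t : Int), g t)) := by
  induction C with
  | zero => simp [PySem.List.enumerate_nil]
  | succ C ih =>
    rw [List.range_succ, List.map_append, PySem.List.enumerate_append, ih, List.map_append]
    simp [PySem.List.enumerate_cons, PySem.List.enumerate_nil]

-- a fold of writes preserves the length
theorem pvFoldSetLength {β : Type} (pos : β → Int) (val : β → String)
    (l : List β) (res : List String) :
    (l.foldl (fun r x => PySem.List.pySetD r (pos x) (val x)) res).length = res.length := by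
  induction l generalizing res with
  | nil => rfl
  | cons x rest ih => rw [List.foldl_cons, ih, PySem.List.length_pySetD]

theorem pvInnerLength (res : List String) (j nI mI : Int) (cases : List String) :
    (pvInner res j nI mI cases).length = res.length := by
  unfold pvInner
  rw [PySem.List.enumerate_eq_zipIdx_map, List.foldl_map]
  exact pvFoldSetLength _ _ _ _

-- pvInner as a clean fold over Nat iteration counts
theorem pvInnerRange (res cases : List String) (j nI mI : Int) (C : Nat)
    (h : PySem.List.pyRange j nI mI = (List.range C).map (fun (k : Nat) => j + mI * (k : Int))) :
    pvInner res j nI mI cases = (List.range C).foldl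
      (fun r (t : Nat) => PySem.List.pySetD r (j + mI * (t : Int))
        (PySem.List.pyGetD cases (PySem.Int.mod (t : Int) (PySem.List.len cases)) "")) res := by
  unfold pvInner
  rw [h, pvEnumMapRange, List.foldl_map]

-- what one group's strided fill leaves at position q
theorem pvInnerChar (res cases : List String) (j nI mI : Int) (hj : 0 ≤ j) (hm : 0 < mI)
    (hpos : ∀ p ∈ PySem.List.pyRange j nI mI, p < (res.length : Int))
    (q : Nat) (hq : q < res.length) :
    (pvInner res j nI mI cases)[q]? =
      if (q : Int) ∈ PySem.List.pyRange j nI mI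
      then some (PySem.List.pyGetD cases
        (PySem.Int.mod (((q : Int) - j) / mI) (PySem.List.len cases)) "")
      else res[q]? := by
  obtain ⟨C, hC⟩ : ∃ C : Nat, PySem.List.pyRange j nI mI
      = (List.range C).map (fun (k : Nat) => j + mI * (k : Int)) :=
    ⟨_, PySem.List.pyRange_of_pos j nI hm⟩
  rw [pvInnerRange res cases j nI mI C hC]
  rw [hC] at hpos
  rw [hC]
  clear hC
  revert hpos
  induction C with
  | zero => intro _; simp
  | succ C ih =>
    intro hpos
    have hpos' : ∀ p ∈ (List.range C).map (fun (k : Nat) => j + mI * (k : Int)),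
        p < (res.length : Int) := by
      intro p hp
      apply hpos
      simp only [List.mem_map, List.mem_range] at hp ⊢
      obtain ⟨t, ht, rfl⟩ := hp
      exact ⟨t, by omega, rfl⟩
    rw [List.range_succ, List.foldl_append]
    simp only [List.foldl_cons, List.foldl_nil]
    have hnn : (0 : Int) ≤ j + mI * (C : Int) := by positivity
    rw [PySem.List.pySetD_of_nonneg _ _ hnn, List.getElem?_set]
    have hPrevLen :
        ((List.range C).foldl (fun r (t : Nat) => PySem.List.pySetD r (j + mI * (t : Int))
          (PySem.List.pyGetD cases (PySem.Int.mod (t : Int) (PySem.List.len cases)) "")) res).length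
          = res.length :=
      pvFoldSetLength (fun (t : Nat) => j + mI * (t : Int))
        (fun (t : Nat) => PySem.List.pyGetD cases (PySem.Int.mod (t : Int) (PySem.List.len cases)) "")
        (List.range C) res
    by_cases hEq : (j + mI * (C : Int)).toNat = q
    · -- position q is written by the last iteration t = C
      have hqInt : (q : Int) = j + mI * (C : Int) := by
        rw [← hEq, Int.toNat_of_nonneg hnn]
      rw [if_pos hEq, if_pos (by rw [hEq, hPrevLen]; exact hq)]
      have hmem : (q : Int) ∈ (List.range C ++ [C]).map (fun (k : Nat) => j + mI * (k : Int)) := by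
        simp only [List.mem_map, List.mem_append, List.mem_range, List.mem_singleton]
        exact ⟨C, Or.inr rfl, hqInt.symm⟩
      rw [if_pos hmem]
      congr 2
      rw [hqInt]
      have hsub : j + mI * (C : Int) - j = mI * (C : Int) := by ring
      rw [hsub, Int.mul_ediv_cancel_left _ (by omega : mI ≠ 0)]
    · -- q untouched by the last write; reduce to the first C writes
      rw [if_neg hEq, ih hpos']
      have hcond : ((q : Int) ∈ (List.range C).map (fun (k : Nat) => j + mI * (k : Int))) ↔
          ((q : Int) ∈ (List.range C ++ [C]).map (fun (k : Nat) => j + mI * (k : Int))) := by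
        simp only [List.mem_map, List.mem_append, List.mem_range, List.mem_singleton]
        constructor
        · rintro ⟨t, ht, h⟩; exact ⟨t, Or.inl ht, h⟩
        · rintro ⟨t, ht, h⟩
          rcases ht with h' | rfl
          · exact ⟨t, h', h⟩
          · exact absurd (by rw [h]; exact Int.toNat_natCast q) hEq
      rw [if_congr hcond rfl rfl]

-- membership in one group's stride, as a residue condition
theorem pvStrideMem (j nI mI : Int) (q : Nat) (hj : 0 ≤ j) (hjm : j < mI)
    (hqn : (q : Int) < nI) :
    ((q : Int) ∈ PySem.List.pyRange j nI mI) ↔ (q : Int) % mI = j := by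
  have hm : 0 < mI := by omega
  rw [PySem.List.mem_pyRange_iff_of_pos hm]
  have hkey : mI * ((q : Int) / mI) + (q : Int) % mI = (q : Int) := Int.mul_ediv_add_emod _ _
  have hq0 : (0 : Int) ≤ (q : Int) / mI := Int.ediv_nonneg (by positivity) (by omega)
  have hprod : (0 : Int) ≤ mI * ((q : Int) / mI) := mul_nonneg (by omega) hq0
  constructor
  · rintro ⟨h1, _, t, ht⟩
    have hqe : (q : Int) = j + mI * t := by omega
    rw [hqe, Int.add_mul_emod_self_left]
    exact Int.emod_eq_of_lt hj hjm
  · intro h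
    exact ⟨by omega, hqn, ⟨(q : Int) / mI, by omega⟩⟩

-- what the whole column-major fill leaves at position q
theorem pvOuterChar (vals : List (List String)) (nI mI : Int) (hm : 0 < mI) :
    ∀ (s : Nat) (res : List String), res.length = nI.toNat →
      ((s : Int) + vals.length ≤ mI) →
      ∀ (q : Nat), q < res.length →
      ((PySem.List.enumerate vals (s : Int)).foldl
          (fun r jc => pvInner r jc.1 nI mI jc.2) res)[q]? =
        if (s : Int) ≤ (q : Int) % mI ∧ (q : Int) % mI < (s : Int) + vals.length
        then some ((fun c => PySem.List.pyGetD c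
              (PySem.Int.mod ((q : Int) / mI) (PySem.List.len c)) "")
            (PySem.List.pyGetD vals ((q : Int) % mI - s) []))
        else res[q]? := by
  induction vals with
  | nil =>
    intro s res _ _ q hq
    simp only [PySem.List.enumerate_nil, List.foldl_nil, List.length_nil, Nat.cast_zero, add_zero]
    rw [if_neg (by omega)]
  | cons c rest ih =>
    intro s res hlen hend q hq
    have hn : 0 < nI := by
      rcases Int.lt_or_le 0 nI with h | h
      · exact h
      · exfalso; rw [hlen] at hq; omega
    have hresn : (res.length : Int) = nI := by rw [hlen]; omega
    have hqn : (q : Int) < nI := by rw [← hresn]; exact_mod_cast hq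
    have hs0 : (0 : Int) ≤ (s : Int) := by positivity
    have hsm : (s : Int) < mI := by
      have : ((c :: rest).length : Int) = rest.length + 1 := by push_cast [List.length_cons]; ring
      rw [this] at hend; omega
    rw [PySem.List.enumerate_cons, List.foldl_cons]
    have hlen' : (pvInner res (s : Int) nI mI c).length = nI.toNat := by
      rw [pvInnerLength, hlen]
    have hq' : q < (pvInner res (s : Int) nI mI c).length := by rw [hlen', ← hlen]; exact hq
    have hrec := ih (s + 1) (pvInner res (s : Int) nI mI c) hlen'
      (by push_cast [List.length_cons] at hend ⊢; omega) q hq'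
    have hcast : ((s : Int) + 1) = ((s + 1 : Nat) : Int) := by push_cast; ring
    rw [hcast, hrec, ← hcast]
    have hinner := pvInnerChar res c (s : Int) nI mI hs0 hm
      (fun p hp => by
        rw [hresn]
        exact ((PySem.List.mem_pyRange_iff_of_pos hm p).mp hp).2.1) q hq
    simp only [pvStrideMem (s : Int) nI mI q hs0 hsm hqn] at hinner
    have hmod0 : (0 : Int) ≤ (q : Int) % mI := Int.emod_nonneg _ (by omega)
    by_cases hqs : (q : Int) % mI = (s : Int)
    · -- position q belongs to group s: untouched by the later groups
      rw [if_neg (by omega), hinner, if_pos hqs]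
      have hqdvd : (q : Int) - s = mI * ((q : Int) / mI) := by
        have := Int.emod_add_mul_ediv (q : Int) mI
        omega
      have hdiv : ((q : Int) - (s : Int)) / mI = (q : Int) / mI := by
        rw [hqdvd, Int.mul_ediv_cancel_left _ (by omega : mI ≠ 0)]
      rw [if_pos (by push_cast [List.length_cons]; omega)]
      have hidx : (q : Int) % mI - (s : Int) = 0 := by omega
      rw [hidx, hdiv]
      simp [PySem.List.pyGetD]
    · -- q belongs to a later group (or none): the c-stride misses it
      rw [hinner, if_neg hqs]
      have hiff : ((s : Int) + 1 ≤ (q : Int) % mI ∧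
            (q : Int) % mI < (s : Int) + 1 + (rest.length : Int)) ↔
          ((s : Int) ≤ (q : Int) % mI ∧
            (q : Int) % mI < (s : Int) + ((c :: rest).length : Int)) := by
        push_cast [List.length_cons]; omega
      by_cases hc2 : (s : Int) + 1 ≤ (q : Int) % mI ∧
          (q : Int) % mI < (s : Int) + 1 + (rest.length : Int)
      · rw [if_pos (by omega), if_pos (by push_cast [List.length_cons]; omega)]
        -- pyGetD rest (r - (s+1)) = pyGetD (c :: rest) (r - s) for r ≥ s + 1
        have h1 : (0 : Int) ≤ (q : Int) % mI - ((s : Int) + 1) := by omega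
        have h2 : (q : Int) % mI - ((s : Int) + 1) < (rest.length : Int) := by omega
        have h3 : (0 : Int) ≤ (q : Int) % mI - (s : Int) := by omega
        have h4 : (q : Int) % mI - (s : Int) < ((c :: rest).length : Int) := by
          push_cast [List.length_cons]; omega
        rw [PySem.List.pyGetD_eq_getElem rest _ h1 h2,
          PySem.List.pyGetD_eq_getElem (c :: rest) _ h3 h4]
        congr 2
        have hidxEq : ((q : Int) % mI - (s : Int)).toNat
            = ((q : Int) % mI - ((s : Int) + 1)).toNat + 1 := by omega
        simp only [hidxEq, List.getElem_cons_succ]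
      · rw [if_neg (by omega),
          if_neg (by push_cast [List.length_cons] at hc2 ⊢; omega)]

-- the two programs agree
theorem pvMain (tcs : List String) (n : Int) :
    get_test_cases_with_unique_outputs tcs n = get_test_cases_with_unique_outputs_alt tcs n := by
  unfold get_test_cases_with_unique_outputs get_test_cases_with_unique_outputs_alt
  rw [pvGroups_eq]
  simp only [PySem.List.len_eq]
  by_cases hk : (pvGroupsB tcs).keys = []
  · -- no group: both sides are []
    have hi : (pvGroupsB tcs).items = [] := by
      simpa [PySem.Dict.keys, List.map_eq_nil_iff] using hk
    have hsz : (pvGroupsB tcs).size = 0 := by simp [PySem.Dict.size, hi]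
    rw [if_pos (Or.inl hsz)]
    by_cases htc : tcs.length = 0
    · rw [if_pos (by exact_mod_cast htc)]
    · rw [if_neg (by exact_mod_cast htc), hk, pvFillA_nil]
  · -- at least one group
    have htc : tcs ≠ [] := by
      intro h; apply hk; rw [h]; rfl
    have hlen : ¬ ((tcs.length : Int) = 0) := by
      simpa using (List.length_pos_of_ne_nil htc).ne'
    rw [if_neg hlen]
    have hsz : ¬ ((pvGroupsB tcs).size = 0) := by
      intro h
      apply hk
      have : (pvGroupsB tcs).items = [] := by
        simpa [PySem.Dict.size] using h
      simp [PySem.Dict.keys, this]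
    by_cases hn : n ≤ 0
    · rw [if_pos (Or.inr hn), PySem.List.pyRange_one_eq_nil (by omega)]
      rfl
    · rw [if_neg (by simp only [not_or]; exact ⟨hsz, by omega⟩)]
      set d := pvGroupsB tcs with hd
      have hnd : d.keys.Nodup := pvNodupKeysGroupsB tcs
      have hvals : d.values = d.keys.map (fun k => d.getD k []) :=
        PySem.Dict.values_eq_map_keys d hnd []
      have hmk : d.size = d.keys.length := by simp [PySem.Dict.size, PySem.Dict.keys]
      have hmv : d.values.length = d.keys.length := by simp [PySem.Dict.keys, hvals]
      have hm : 0 < d.keys.length := List.length_pos_of_ne_nil hk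
      have hmI : (0 : Int) < (d.size : Int) := by rw [hmk]; exact_mod_cast hm
      rw [pvFillA_eq _ _ hk]
      -- both sides have length n.toNat; compare pointwise
      have hrep : (List.replicate n.toNat "").length = n.toNat := List.length_replicate
      apply List.ext_getElem?
      intro q
      by_cases hq : q < n.toNat
      · -- A side: element q of the mapped range
        have hqI0 : (0 : Int) ≤ (q : Int) := by positivity
        have hqIn : (q : Int) < n := by omega
        have hA : ([] ++ (PySem.List.pyRange 0 n 1).map (pvIdx d d.keys))[q]? =
            some (pvIdx d d.keys (q : Int)) := by
          rw [List.nil_append]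
          rw [List.getElem?_map, PySem.List.getElem?_pyRange_one]
          rw [if_pos (by omega)]
          simp
        rw [hA]
        -- B side
        have hB := pvOuterChar d.values n (d.size : Int) hmI 0 (List.replicate n.toNat "")
          hrep (by rw [hmv, ← hmk]; simp) q (by rw [hrep]; exact hq)
        simp only [Nat.cast_zero, zero_add, Int.sub_zero] at hB
        have hcond : (0 : Int) ≤ (q : Int) % (d.size : Int) ∧
            (q : Int) % (d.size : Int) < (d.values.length : Int) := by
          constructor
          · exact Int.emod_nonneg _ (by omega)
          · have := Int.emod_lt_of_pos (q : Int) hmI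
            rw [hmv] at *
            push_cast [hmk] at *
            omega
        rw [if_pos hcond] at hB
        rw [hB]
        -- now show pvIdx equals the B-side value
        unfold pvIdx
        simp only [PySem.List.len_eq]
        have hmod : PySem.Int.mod (q : Int) ((d.keys.length : Nat) : Int)
            = (q : Int) % (d.keys.length : Int) :=
          PySem.Int.mod_eq_emod_of_pos (by exact_mod_cast hm)
        have hdivm : PySem.Int.floordiv (q : Int) ((d.keys.length : Nat) : Int)
            = (q : Int) / (d.keys.length : Int) :=
          PySem.Int.floordiv_eq_ediv_of_pos (by exact_mod_cast hm)
        have hmodb : (0 : Int) ≤ (q : Int) % (d.keys.length : Int) :=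
          Int.emod_nonneg _ (by exact_mod_cast hm.ne')
        have hmodlt : (q : Int) % (d.keys.length : Int) < (d.keys.length : Int) :=
          Int.emod_lt_of_pos _ (by exact_mod_cast hm)
        have hszem : ((d.size : Nat) : Int) = (d.keys.length : Int) := by exact_mod_cast hmk
        rw [hmod, hdivm, hszem]
        -- identify the group list on both sides
        have hkeyElem : PySem.List.pyGetD d.keys ((q : Int) % (d.keys.length : Int)) ""
            = d.keys[((q : Int) % (d.keys.length : Int)).toNat]'(by omega) := by
          rw [PySem.List.pyGetD_eq_getElem d.keys _ hmodb hmodlt]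
        have hvalElem : PySem.List.pyGetD d.values ((q : Int) % (d.keys.length : Int)) []
            = d.getD (d.keys[((q : Int) % (d.keys.length : Int)).toNat]'(by omega)) [] := by
          rw [PySem.List.pyGetD_eq_getElem d.values _ hmodb (by rw [hmv]; exact_mod_cast hmodlt)]
          simp only [hvals]
          rw [List.getElem_map]
        rw [hkeyElem, hvalElem]
      · -- beyond n.toNat: both sides are none
        have hAlen : ([] ++ (PySem.List.pyRange 0 n 1).map (pvIdx d d.keys)).length = n.toNat := by
          simp [PySem.List.length_pyRange_one]
        have hBlen : ((PySem.List.enumerate d.values (0 : Int)).foldl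
            (fun r jc => pvInner r jc.1 n (d.size : Int) jc.2)
            (List.replicate n.toNat "")).length = n.toNat := by
          have : ∀ (vs : List (Int × List String)) (res : List String),
              (vs.foldl (fun r jc => pvInner r jc.1 n (d.size : Int) jc.2) res).length
                = res.length := by
            intro vs
            induction vs with
            | nil => intro res; rfl
            | cons v rest ih => intro res; rw [List.foldl_cons, ih, pvInnerLength]
          rw [this, hrep]
        rw [List.getElem?_eq_none (by omega), List.getElem?_eq_none (by omega)]

-- ===== VERDICT (by name: the statement is the Claim_ definition above) =====
theorem get_test_cases_with_unique_outputs_spec : Claim_equal_get_test_cases_with_unique_outputs := by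
  intro tcs n _
  unfold Spec_get_test_cases_with_unique_outputs
  exact pvMain tcs n
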